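-- pv_equiv track=rewrite | github.com/aleksandr-bembel/pyneng-examples-exercises | exercises/09_functions/task_9_2a.py | generate_trunk_config
-- ===== SOURCE A (Python) =====
-- def generate_trunk_config(intf_vlan_mapping, trunk_template):
--     config = {}
--     for intf, vlans in intf_vlan_mapping.items():
--         config[intf] = []
--         for line in trunk_template:
--             if "allowed vlan" in line:
--                 config[intf].append(
--                     line + " " + ",".join([str(vlan) for vlan in vlans]))
--             else:
--                 config[intf].append(line)
--     return config
-- ===== SOURCE B (Python) =====
-- def generate_trunk_config(intf_vlan_mapping, trunk_template):
--     # Column-major: one pass over the template builds, per line, the column of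
--     # rendered strings for all interfaces; a final transpose yields each
--     # interface's config list.
--     pairs = list(intf_vlan_mapping.items())
--     columns = []
--     for line in trunk_template:
--         if "allowed vlan" in line:
--             columns.append([line + " " + ",".join(str(v) for v in vlans)
--                             for _, vlans in pairs])
--         else:
--             columns.append([line] * len(pairs))
--     return {intf: [column[i] for column in columns]
--             for i, (intf, _) in enumerate(pairs)}
-- ===== Notes on version B (the rewrite author's own statement) =====
-- stated objective: alternative
-- what changed: B builds the config column-major: a single pass over the template produces, for each template line, the column of rendered strings for all interfaces (joining each interface's vlans there), and a final transpose by index assembles each interface's line list, instead of A's row-major per-interface rescan of every template line.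
import Mathlib
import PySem

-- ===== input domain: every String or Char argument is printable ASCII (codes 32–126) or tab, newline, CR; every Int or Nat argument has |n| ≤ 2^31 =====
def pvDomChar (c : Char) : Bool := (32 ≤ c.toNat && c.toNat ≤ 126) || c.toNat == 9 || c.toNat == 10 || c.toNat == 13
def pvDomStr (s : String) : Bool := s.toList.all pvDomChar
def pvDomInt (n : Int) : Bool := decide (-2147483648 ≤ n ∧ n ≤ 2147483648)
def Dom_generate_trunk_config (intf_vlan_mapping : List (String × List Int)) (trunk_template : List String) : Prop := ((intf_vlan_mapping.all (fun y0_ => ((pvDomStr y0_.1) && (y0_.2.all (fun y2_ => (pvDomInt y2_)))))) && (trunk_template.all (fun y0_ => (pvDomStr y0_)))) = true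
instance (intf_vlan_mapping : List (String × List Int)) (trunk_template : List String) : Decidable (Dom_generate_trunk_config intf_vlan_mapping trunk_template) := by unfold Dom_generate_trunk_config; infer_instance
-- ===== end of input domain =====

-- B builds the result column-major: one pass over the template produces, per template line,
-- the column of rendered strings for all interfaces at once, and a final transpose (indexing
-- each column at the interface's position) yields each interface's list (objective: alternative).

-- ===== PORT A =====
def generate_trunk_config (intf_vlan_mapping : List (String × List Int)) (trunk_template : List String) : List (String × List String) :=
  (intf_vlan_mapping.foldl (fun config p =>
      trunk_template.foldl (fun config line =>
          config.insert p.1 ((config.getD p.1 []) ++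
            [if PySem.Str.isIn "allowed vlan" line
             then line ++ " " ++ PySem.Str.join "," (p.2.map PySem.Int.toStr)
             else line]))
        (config.insert p.1 []))
    PySem.Dict.empty).items

-- ===== PORT B =====
def generate_trunk_config_alt (intf_vlan_mapping : List (String × List Int)) (trunk_template : List String) : List (String × List String) :=
  let pairs := intf_vlan_mapping
  let columns := trunk_template.map (fun line =>
    if PySem.Str.isIn "allowed vlan" line
    then pairs.map (fun p => line ++ " " ++ PySem.Str.join "," (p.2.map PySem.Int.toStr))
    else List.replicate pairs.length line)
  -- q.1 is a nonnegative enumerate index < len(column) for every column, so Python's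
  -- column[i] never raises here; '(pyGet? …).getD ""' only makes the expression total.
  ((PySem.List.enumerate pairs 0).foldl (fun d q =>
      d.insert q.2.1 (columns.map (fun column => (PySem.List.pyGet? column q.1).getD "")))
    PySem.Dict.empty).items

-- ===== PRECONDITION & SPEC =====
def Spec_generate_trunk_config (intf_vlan_mapping : List (String × List Int)) (trunk_template : List String) (out : List (String × List String)) : Prop := out = generate_trunk_config_alt intf_vlan_mapping trunk_template
instance (intf_vlan_mapping : List (String × List Int)) (trunk_template : List String) (out : List (String × List String)) : Decidable (Spec_generate_trunk_config intf_vlan_mapping trunk_template out) := by unfold Spec_generate_trunk_config; infer_instance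

-- ===== CLAIM (what is proved, stated in full; the proofs are below) =====
def Claim_equal_generate_trunk_config : Prop := ∀ (intf_vlan_mapping : List (String × List Int)) (trunk_template : List String), Dom_generate_trunk_config intf_vlan_mapping trunk_template → Spec_generate_trunk_config intf_vlan_mapping trunk_template (generate_trunk_config intf_vlan_mapping trunk_template)

-- ===== LEMMAS AND PROOFS =====

-- A's inner loop: repeated 'config[k].append(f line)' starting from config[k] = acc
theorem gtc_A_inner (f : String → String) (l : List String)
    (cfg : PySem.Dict String (List String)) (k : String) (acc : List String) :
    l.foldl (fun c line => c.insert k ((c.getD k []) ++ [f line])) (cfg.insert k acc)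
      = cfg.insert k (acc ++ l.map f) := by
  induction l generalizing acc with
  | nil => simp
  | cons hd tl ih =>
      simp only [List.foldl_cons, List.map_cons]
      rw [PySem.Dict.getD_insert, PySem.Dict.insert_insert_self, ih]
      simp

-- B's transpose fold: inserting row i (read out of the columns) for the i-th pair equals
-- inserting that pair's rendered list directly
theorem gtc_B_fold (V : Int → List String) (render : (String × List Int) → List String)
    (pairs : List (String × List Int))
    (hV : ∀ (n : Nat) (hn : n < pairs.length), V (n : Int) = render pairs[n]) :
    ∀ (tl pre : List (String × List Int)) (d : PySem.Dict String (List String)),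
      pairs = pre ++ tl →
      (PySem.List.enumerate tl (pre.length : Int)).foldl
          (fun d q => d.insert q.2.1 (V q.1)) d
        = tl.foldl (fun d p => d.insert p.1 (render p)) d := by
  intro tl
  induction tl with
  | nil => intro pre d h; simp [PySem.List.enumerate_nil]
  | cons hd tl ih =>
      intro pre d h
      rw [PySem.List.enumerate_cons, List.foldl_cons, List.foldl_cons]
      have hlt : pre.length < pairs.length := by subst h; simp
      have hget : pairs[pre.length] = hd := by subst h; simp
      rw [hV pre.length hlt, hget]
      have hcast : ((pre.length : Int) + 1) = (((pre ++ [hd]).length : Int)) := by simp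
      rw [hcast, ih (pre ++ [hd]) _ (by simp [h])]

-- reading row n out of the columns gives the n-th pair's rendered template
theorem gtc_row (tmpl : List String) (pairs : List (String × List Int))
    (n : Nat) (hn : n < pairs.length) :
    (tmpl.map (fun line =>
        if PySem.Str.isIn "allowed vlan" line
        then pairs.map (fun p => line ++ " " ++ PySem.Str.join "," (p.2.map PySem.Int.toStr))
        else List.replicate pairs.length line)).map
      (fun column => (PySem.List.pyGet? column (n : Int)).getD "")
      = tmpl.map (fun line =>
          if PySem.Str.isIn "allowed vlan" line
          then line ++ " " ++ PySem.Str.join "," (pairs[n].2.map PySem.Int.toStr)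
          else line) := by
  rw [List.map_map]
  refine List.map_congr_left ?_
  intro line _
  simp only [PySem.List.pyGet?_natCast]
  split_ifs with hp
  all_goals simp [PySem.Str.isIn] at hp
  · simp [hp, List.getElem?_eq_getElem hn]
  · simp [hp, hn]

-- ===== VERDICT (by name: the statement is the Claim_ definition above) =====
theorem generate_trunk_config_spec : Claim_equal_generate_trunk_config := by
  intro m tmpl _
  unfold Spec_generate_trunk_config generate_trunk_config generate_trunk_config_alt
  apply congrArg PySem.Dict.items
  have hA : (fun (config : PySem.Dict String (List String)) (p : String × List Int) =>
        tmpl.foldl (fun config line =>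
            config.insert p.1 ((config.getD p.1 []) ++
              [if PySem.Str.isIn "allowed vlan" line
               then line ++ " " ++ PySem.Str.join "," (p.2.map PySem.Int.toStr)
               else line]))
          (config.insert p.1 []))
      = (fun config p => config.insert p.1
          (tmpl.map (fun line =>
            if PySem.Str.isIn "allowed vlan" line
            then line ++ " " ++ PySem.Str.join "," (p.2.map PySem.Int.toStr)
            else line))) := by
    funext config p
    rw [gtc_A_inner (fun line =>
      if PySem.Str.isIn "allowed vlan" line
      then line ++ " " ++ PySem.Str.join "," (p.2.map PySem.Int.toStr)
      else line)]
    simp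
  rw [hA]
  have hB := gtc_B_fold
    (fun i => (tmpl.map (fun line =>
        if PySem.Str.isIn "allowed vlan" line
        then m.map (fun p => line ++ " " ++ PySem.Str.join "," (p.2.map PySem.Int.toStr))
        else List.replicate m.length line)).map
      (fun column => (PySem.List.pyGet? column i).getD ""))
    (fun p => tmpl.map (fun line =>
        if PySem.Str.isIn "allowed vlan" line
        then line ++ " " ++ PySem.Str.join "," (p.2.map PySem.Int.toStr)
        else line))
    m (fun n hn => gtc_row tmpl m n hn) m [] PySem.Dict.empty (by simp)
  simp only [List.length_nil, Int.natCast_zero] at hB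
  exact hB.symm
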